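-- pv_equiv track=rewrite | github.com/AsithaLKonara/J-tech-License-server | core/mapping/irregular_shape_mapper.py | generate_mask_from_coordinates
-- ===== SOURCE A (Python) =====
-- from typing import List, Tuple, Optional
--
-- def generate_mask_from_coordinates(
--     coordinates: List[Tuple[int, int]],
--     width: int,
--     height: int
-- ) -> List[List[bool]]:
--     """
--     Convert coordinate list to 2D boolean mask.
--
--     Args:
--         coordinates: List of (x, y) tuples for active cells
--         width: Grid width
--         height: Grid height
--
--     Returns:
--         2D list: mask[y][x] = True if cell is active
--     """
--     mask = [[False for _ in range(width)] for _ in range(height)]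
--
--     for x, y in coordinates:
--         if 0 <= x < width and 0 <= y < height:
--             mask[y][x] = True
--
--     return mask
-- ===== SOURCE B (Python) =====
-- def generate_mask_from_coordinates(coordinates, width, height):
--     coord_set = set(coordinates)
--     return [[(x, y) in coord_set for x in range(width)] for y in range(height)]
-- ===== Notes on version B (the rewrite author's own statement) =====
-- stated objective: idiomatic
-- what changed: Replaces A's scatter (pre-zeroed grid mutated cell-by-cell from the coordinate list, with a bounds guard) by a gather: build a set of the coordinates once, then construct the mask with a nested comprehension testing set membership at every grid cell.
import Mathlib
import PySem

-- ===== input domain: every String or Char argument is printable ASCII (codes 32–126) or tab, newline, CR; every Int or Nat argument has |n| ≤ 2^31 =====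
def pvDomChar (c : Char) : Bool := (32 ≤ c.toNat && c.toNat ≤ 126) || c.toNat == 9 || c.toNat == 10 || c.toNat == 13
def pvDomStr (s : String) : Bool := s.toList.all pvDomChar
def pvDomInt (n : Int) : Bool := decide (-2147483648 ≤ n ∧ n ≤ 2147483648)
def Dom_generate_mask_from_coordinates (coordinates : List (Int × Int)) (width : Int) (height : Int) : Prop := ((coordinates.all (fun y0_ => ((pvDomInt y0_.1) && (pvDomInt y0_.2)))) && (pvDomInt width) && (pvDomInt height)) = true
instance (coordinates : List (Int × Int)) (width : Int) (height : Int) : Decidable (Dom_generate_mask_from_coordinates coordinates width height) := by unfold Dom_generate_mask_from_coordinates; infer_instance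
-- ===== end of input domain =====

-- B replaces A's scatter (mutate a pre-zeroed grid from the coordinate list) by a gather
-- (set of coordinates, nested comprehension testing membership at every cell): more idiomatic.


-- ===== PORT A =====
-- loop body of 'for x, y in coordinates': mask[y][x] = True under the bounds guard
def maskStep (width height : Int) (mask : List (List Bool)) (xy : Int × Int) : List (List Bool) :=
  if 0 ≤ xy.1 ∧ xy.1 < width ∧ 0 ≤ xy.2 ∧ xy.2 < height then
    PySem.List.pySetD mask xy.2 (PySem.List.pySetD (PySem.List.pyGetD mask xy.2 []) xy.1 true)
  else mask

def generate_mask_from_coordinates (coordinates : List (Int × Int)) (width : Int) (height : Int) : List (List Bool) :=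
  let mask := (PySem.List.pyRange 0 height 1).map (fun _ => (PySem.List.pyRange 0 width 1).map (fun _ => false))
  coordinates.foldl (maskStep width height) mask

-- ===== PORT B =====
def generate_mask_from_coordinates_alt (coordinates : List (Int × Int)) (width : Int) (height : Int) : List (List Bool) :=
  let coord_set : PySem.Set (Int × Int) := PySem.Set.ofList coordinates
  (PySem.List.pyRange 0 height 1).map (fun y =>
    (PySem.List.pyRange 0 width 1).map (fun x => PySem.Set.contains coord_set (x, y)))

-- ===== PRECONDITION & SPEC =====
def Spec_generate_mask_from_coordinates (coordinates : List (Int × Int)) (width : Int) (height : Int) (out : List (List Bool)) : Prop := out = generate_mask_from_coordinates_alt coordinates width height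
instance (coordinates : List (Int × Int)) (width : Int) (height : Int) (out : List (List Bool)) : Decidable (Spec_generate_mask_from_coordinates coordinates width height out) := by unfold Spec_generate_mask_from_coordinates; infer_instance

-- ===== CLAIM (what is proved, stated in full; the proofs are below) =====
def Claim_equal_generate_mask_from_coordinates : Prop := ∀ (coordinates : List (Int × Int)) (width : Int) (height : Int), Dom_generate_mask_from_coordinates coordinates width height → Spec_generate_mask_from_coordinates coordinates width height (generate_mask_from_coordinates coordinates width height)

-- ===== LEMMAS AND PROOFS =====

-- the "gather" grid for an arbitrary coordinate list S (proof-only helper)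
def pvGrid (width height : Int) (S : List (Int × Int)) : List (List Bool) :=
  (PySem.List.pyRange 0 height 1).map (fun y =>
    (PySem.List.pyRange 0 width 1).map (fun x => decide ((x, y) ∈ S)))

lemma pvGrid_nil (width height : Int) :
    pvGrid width height [] =
      (PySem.List.pyRange 0 height 1).map (fun _ => (PySem.List.pyRange 0 width 1).map (fun _ => false)) := by
  simp [pvGrid]

lemma pvGrid_getElem (width height : Int) (S : List (Int × Int)) (j : Nat)
    (hj : j < (pvGrid width height S).length) :
    (pvGrid width height S)[j] =
      (PySem.List.pyRange 0 width 1).map (fun x' => decide ((x', (j : Int)) ∈ S)) := by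
  simp [pvGrid, PySem.List.getElem_pyRange_one]

lemma pyRow_getElem (w : Int) (f : Int → Bool) (i : Nat)
    (hi : i < ((PySem.List.pyRange 0 w 1).map f).length) :
    ((PySem.List.pyRange 0 w 1).map f)[i] = f i := by
  simp [PySem.List.getElem_pyRange_one]

lemma maskStep_pvGrid (width height : Int) (S : List (Int × Int)) (c : Int × Int) :
    maskStep width height (pvGrid width height S) c = pvGrid width height (S ++ [c]) := by
  obtain ⟨x, y⟩ := c
  by_cases hb : 0 ≤ x ∧ x < width ∧ 0 ≤ y ∧ y < height
  · obtain ⟨hx0, hxw, hy0, hyh⟩ := hb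
    have hrow : PySem.List.pyGetD (pvGrid width height S) y [] =
        (PySem.List.pyRange 0 width 1).map (fun x' => decide ((x', y) ∈ S)) := by
      simpa [pvGrid] using
        PySem.List.pyGetD_map_pyRange_of_nonneg
          (fun y' => (PySem.List.pyRange 0 width 1).map (fun x' => decide ((x', y') ∈ S)))
          height y [] hy0 hyh
    have hstep : maskStep width height (pvGrid width height S) (x, y) =
        (pvGrid width height S).set y.toNat
          (((PySem.List.pyRange 0 width 1).map (fun x' => decide ((x', y) ∈ S))).set x.toNat true) := by
      rw [maskStep, if_pos ⟨hx0, hxw, hy0, hyh⟩, hrow,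
        PySem.List.pySetD_of_nonneg _ _ hx0, PySem.List.pySetD_of_nonneg _ _ hy0]
    rw [hstep]
    apply List.ext_getElem
    · simp [pvGrid, PySem.List.length_pyRange_one]
    · intro j hj hj'
      rw [List.getElem_set, pvGrid_getElem _ _ _ _ hj']
      by_cases hjy : y.toNat = j
      · rw [if_pos hjy]
        have hyc : ((j : Int)) = y := by omega
        apply List.ext_getElem
        · simp [PySem.List.length_pyRange_one]
        · intro i hi hi'
          rw [List.getElem_set, pyRow_getElem _ _ _ hi']
          by_cases hix : x.toNat = i
          · rw [if_pos hix]
            have hxc : ((i : Int)) = x := by omega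
            simp [hxc, hyc, List.mem_append]
          · rw [if_neg hix, pyRow_getElem]
            have hxc : ((i : Int)) ≠ x := by omega
            simp [hxc, hyc, List.mem_append]
      · rw [if_neg hjy]
        have hyc : ((j : Int)) ≠ y := by omega
        have hjp : j < (pvGrid width height S).length := by simpa using hj
        rw [pvGrid_getElem _ _ _ _ hjp]
        refine List.map_congr_left (fun x' _ => ?_)
        simp [List.mem_append, hyc]
  · rw [maskStep, if_neg hb]
    unfold pvGrid
    refine List.map_congr_left (fun y' hy' => List.map_congr_left (fun x' hx' => ?_))
    have hy'b := (PySem.List.mem_pyRange_one).1 hy'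
    have hx'b := (PySem.List.mem_pyRange_one).1 hx'
    have hne : (x', y') ≠ (x, y) := by
      intro h; injection h with h1 h2; subst h1; subst h2; omega
    simp [List.mem_append, hne]

lemma foldl_maskStep_pvGrid (width height : Int) :
    ∀ (cs S : List (Int × Int)),
      cs.foldl (maskStep width height) (pvGrid width height S) = pvGrid width height (S ++ cs) := by
  intro cs
  induction cs with
  | nil => intro S; simp
  | cons c cs ih =>
      intro S
      rw [List.foldl_cons, maskStep_pvGrid, ih, ← List.append_cons]

lemma alt_eq_pvGrid (coordinates : List (Int × Int)) (width height : Int) :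
    generate_mask_from_coordinates_alt coordinates width height = pvGrid width height coordinates := by
  unfold generate_mask_from_coordinates_alt pvGrid
  refine List.map_congr_left (fun y _ => List.map_congr_left (fun x _ => ?_))
  simp [PySem.Set.contains_eq_listContains, PySem.Set.mem_ofList]

-- ===== VERDICT (by name: the statement is the Claim_ definition above) =====
theorem generate_mask_from_coordinates_spec : Claim_equal_generate_mask_from_coordinates := by
  intro coordinates width height _
  unfold Spec_generate_mask_from_coordinates
  rw [alt_eq_pvGrid]
  unfold generate_mask_from_coordinates
  rw [← pvGrid_nil, foldl_maskStep_pvGrid, List.nil_append]
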